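-- pv_equiv track=rewrite | github.com/devichalamalaseti/Python-Assignments | Level 2/Q10.py | stones
-- ===== SOURCE A (Python) =====
-- def stones(s):
--     pile=[]
--     if s%2==0:
--         stn=2
--     else:
--         stn=1
--         while s>0:
--             pile.append(stn)
--             s-=stn
--             stn+=2
--     return pile
-- ===== SOURCE B (Python) =====
-- def stones(s):
--     # Count k = least k >= 1 with k*k >= s, then emit the odd numbers 1,3,...,2k-1 in one shot.
--     if s % 2 == 0 or s <= 0:
--         return []
--     k = 1
--     while k * k < s:
--         k += 1
--     return list(range(1, 2 * k, 2))
-- ===== Notes on version B (the rewrite author's own statement) =====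
-- stated objective: alternative
-- what changed: Replaces A's subtract-and-append while-loop (which maintains the running remainder and grows the list one odd number at a time) by counting k = the least positive integer whose square reaches s, via a square comparison, and then emitting the first k odd numbers as a single range call.
import Mathlib
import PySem

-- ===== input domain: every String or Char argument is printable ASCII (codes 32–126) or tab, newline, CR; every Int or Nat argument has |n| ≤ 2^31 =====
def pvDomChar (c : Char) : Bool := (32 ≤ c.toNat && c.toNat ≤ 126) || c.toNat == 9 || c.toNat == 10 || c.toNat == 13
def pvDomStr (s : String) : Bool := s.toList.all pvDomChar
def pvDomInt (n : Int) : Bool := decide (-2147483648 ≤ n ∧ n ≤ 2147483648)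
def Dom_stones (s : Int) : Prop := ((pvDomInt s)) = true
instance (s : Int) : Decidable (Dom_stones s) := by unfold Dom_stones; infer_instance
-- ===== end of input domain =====

-- B replaces A's subtract-and-append while-loop by counting k (least k with k*k ≥ s) and
-- emitting list(range(1, 2*k, 2)) in one shot (objective: alternative/simpler structure).

-- ===== PORT A =====
-- while s>0: pile.append(stn); s-=stn; stn+=2   (fuel = s.toNat bounds the iterations: s drops by stn ≥ 1 each step)
def stonesLoopA (fuel : Nat) (s stn : Int) (pile : List Int) : List Int :=
  match fuel with
  | 0 => pile
  | fuel + 1 =>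
    if 0 < s then stonesLoopA fuel (s - stn) (stn + 2) (pile ++ [stn]) else pile

def stones (s : Int) : List Int :=
  if PySem.Int.mod s 2 == 0 then []
  else stonesLoopA s.toNat s 1 []

-- ===== PORT B =====
-- k = 1; while k*k < s: k += 1   (fuel = s.toNat bounds the iterations: k stops by k = s at the latest)
def stonesCountB (fuel : Nat) (k s : Int) : Int :=
  match fuel with
  | 0 => k
  | fuel + 1 => if k * k < s then stonesCountB fuel (k + 1) s else k

def stones_alt (s : Int) : List Int :=
  if PySem.Int.mod s 2 == 0 || s ≤ 0 then []
  else
    let k := stonesCountB s.toNat 1 s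
    PySem.List.pyRange 1 (2 * k) 2

-- ===== PRECONDITION & SPEC =====
def Spec_stones (s : Int) (out : List Int) : Prop := out = stones_alt s
instance (s : Int) (out : List Int) : Decidable (Spec_stones s out) := by unfold Spec_stones; infer_instance

-- ===== CLAIM (what is proved, stated in full; the proofs are below) =====
def Claim_equal_stones : Prop := ∀ (s : Int), Dom_stones s → Spec_stones s (stones s)

-- ===== LEMMAS AND PROOFS =====

-- K s = least k ≥ 1 with k² ≥ s (for 0 < s), via Nat.sqrt
def pvK (s : Int) : Nat := Nat.sqrt (s - 1).toNat + 1

lemma pvK_ge (s : Int) (hs : 0 < s) : s ≤ (pvK s : Int) * (pvK s : Int) := by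
  have h := Nat.lt_succ_sqrt' (s - 1).toNat
  have h1 : ((s - 1).toNat : Int) = s - 1 := by omega
  unfold pvK
  push_cast
  nlinarith [h, h1]

lemma pvK_lt (s : Int) (hs : 0 < s) :
    ((pvK s : Int) - 1) * ((pvK s : Int) - 1) < s := by
  have h := Nat.sqrt_le' (s - 1).toNat
  have h1 : ((s - 1).toNat : Int) = s - 1 := by omega
  unfold pvK
  push_cast
  nlinarith [h, h1]

-- least property: any 0 ≤ j with j² ≥ s has pvK s ≤ j
lemma pvK_least (s j : Int) (hs : 0 < s) (hj : 0 ≤ j) (h : s ≤ j * j) :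
    (pvK s : Int) ≤ j := by
  by_contra hc
  push_neg at hc
  have h2 := pvK_lt s hs
  nlinarith

-- B's count loop reaches pvK
lemma countB_eq (fuel : Nat) (k s : Int) (hs : 0 < s) (hk : 1 ≤ k)
    (hkK : k ≤ (pvK s : Int)) (hf : (pvK s : Int) - k ≤ (fuel : Int)) :
    stonesCountB fuel k s = (pvK s : Int) := by
  induction fuel generalizing k with
  | zero =>
    simp only [stonesCountB]
    omega
  | succ n ih =>
    simp only [stonesCountB]
    split_ifs with h
    · have hlt : k < (pvK s : Int) := by
        rcases lt_or_eq_of_le hkK with h' | h'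
        · exact h'
        · exfalso; have := pvK_ge s hs; rw [h'] at h; omega
      exact ih (k + 1) (by omega) (by omega) (by push_cast; omega)
    · push_neg at h
      have := pvK_least s k hs (by omega) h
      omega

-- the odd numbers 2i+1, 2(i+1)+1, …, c of them
def pvOdds (i c : Nat) : List Int := (List.range' i c).map (fun (j : Nat) => 2 * (j : Int) + 1)

lemma pvOdds_cons (i c : Nat) : pvOdds i (c + 1) = (2 * (i : Int) + 1) :: pvOdds (i + 1) c := by
  simp [pvOdds, List.range'_succ]

-- A's loop, started at index i with remaining s, appends the odds with indices i … pvK (s+i²) - 1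
lemma loopA_eq (fuel : Nat) :
    ∀ (i : Nat) (s : Int) (pile : List Int), s.toNat ≤ fuel →
      stonesLoopA fuel s (2 * (i : Int) + 1) pile =
        pile ++ pvOdds i (if 0 < s then pvK (s + (i : Int) * i) - i else 0) := by
  induction fuel with
  | zero =>
    intro i s pile hf
    have : ¬ 0 < s := by omega
    simp [stonesLoopA, this, pvOdds]
  | succ n ih =>
    intro i s pile hf
    simp only [stonesLoopA]
    split_ifs with h
    · -- one iteration: remaining s - (2i+1), index i+1
      have hrec := ih (i + 1) (s - (2 * (i : Int) + 1)) (pile ++ [2 * (i : Int) + 1]) (by omega)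
      have harg : s - (2 * (i : Int) + 1) + ((i : Int) + 1) * ((i : Int) + 1)
          = s + (i : Int) * i := by ring
      push_cast at hrec
      rw [harg] at hrec
      push_cast
      rw [show (2 * (i : Int) + 1) + 2 = 2 * ((i : Int) + 1) + 1 by ring]
      rw [hrec, List.append_assoc]
      -- now align the two pvOdds expressions
      have hs0 : (0 : Int) < s + (i : Int) * i := by nlinarith
      have hiK : i < pvK (s + (i : Int) * i) := by
        by_contra hc
        push_neg at hc
        have h2 := pvK_ge (s + (i : Int) * i) hs0
        have hci : ((pvK (s + (i : Int) * i) : Int)) ≤ (i : Int) := by exact_mod_cast hc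
        nlinarith
      by_cases h2 : 0 < s - (2 * (i : Int) + 1)
      · -- loop continues after this step
        simp only [h2, if_true]
        have hcnt : pvK (s + (i : Int) * i) - i = (pvK (s + (i : Int) * i) - (i + 1)) + 1 := by
          omega
        rw [hcnt, pvOdds_cons]
        simp
      · -- this was the last iteration: (i+1)² ≥ s + i², so pvK = i + 1
        simp only [h2, if_false]
        have hKi : pvK (s + (i : Int) * i) = i + 1 := by
          have hle := pvK_least (s + (i : Int) * i) ((i : Int) + 1) hs0 (by positivity)
            (by nlinarith)
          push_cast at hle
          omega
        rw [hKi]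
        have : i + 1 - i = 1 := by omega
        rw [this, pvOdds_cons]
        simp [pvOdds]
    · simp [pvOdds]

-- pyRange 1 (2k) 2 is the list of the first k odd numbers
lemma pyRange_odds (k : Nat) :
    PySem.List.pyRange 1 (2 * (k : Int)) 2 = pvOdds 0 k := by
  rw [PySem.List.pyRange_of_pos 1 (2 * (k : Int)) (by norm_num)]
  by_cases hk : 0 < k
  · have hlt : (1 : Int) < 2 * (k : Int) := by omega
    rw [if_pos hlt]
    have : ((2 * (k : Int) - 1 + 2 - 1) / 2).toNat = k := by omega
    rw [this]
    simp only [pvOdds]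
    rw [← List.range_eq_range']
    apply List.map_congr_left
    intro x _
    ring
  · have : k = 0 := by omega
    subst this
    simp [pvOdds]

theorem stones_eq_alt (s : Int) : stones s = stones_alt s := by
  unfold stones stones_alt
  rcases PySem.Int.mod_two_eq s with h | h
  · rw [h]; norm_num
  · rw [h]
    norm_num
    by_cases hs : 0 < s
    · rw [if_neg (by omega : ¬ s ≤ 0)]
      have hK1 : 1 ≤ (pvK s : Int) := by unfold pvK; push_cast; omega
      have hKs : (pvK s : Int) ≤ s := by
        by_contra hc
        push_neg at hc
        have h2 := pvK_lt s hs
        have : s ≤ (pvK s : Int) - 1 := by omega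
        nlinarith
      rw [countB_eq s.toNat 1 s hs (le_refl 1) hK1 (by omega)]
      have hA := loopA_eq s.toNat 0 s [] (le_refl _)
      simp only [Nat.cast_zero, mul_zero, zero_add, add_zero, if_pos hs,
        Nat.sub_zero, List.nil_append] at hA
      rw [hA, pyRange_odds]
    · rw [if_pos (by omega : s ≤ 0)]
      have : s.toNat = 0 := by omega
      rw [this]
      simp [stonesLoopA]

-- ===== VERDICT (by name: the statement is the Claim_ definition above) =====
theorem stones_spec : Claim_equal_stones := by
  intro s _
  exact stones_eq_alt s
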